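-- pv_equiv track=rewrite | github.com/zeroempty2/Algorithm | 프로그래머스/2/148653. 마법의 엘리베이터/마법의 엘리베이터.py | solution
-- ===== SOURCE A (Python) =====
-- def solution(storey):
--     answer = 0
--     while storey > 0:
--         unit = storey % 10  # 현재 자릿수
--         higher_unit = (storey // 10) % 10  # 그 위의 자릿수 (10의 자리)
--
--         # 자릿수가 0이면 그 자릿수는 건너뛰기
--         if unit == 0:
--             storey //= 10
--             continue
--
--         # 자릿수가 5 이상이고, 더 높은 자릿수가 있다면 한 자리를 올려주는 것이 유리
--         if unit > 5:
--             # 10에서 unit을 빼면 최소 돌 개수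
--             answer += (10 - unit)
--             # 올라가야 할 만큼 storey 증가
--             storey += (10 - unit)
--         elif unit == 5 and higher_unit >= 5:
--             # 자릿수가 5인데 그 위 자릿수가 5 이상이면 한 자리를 올려주는 것이 유리
--             answer += (10 - unit)
--             storey += (10 - unit)
--         else:
--             answer += unit  # unit 만큼 마법의 돌 사용
--             storey -= unit  # 나머지 층을 빼서 처리
--
--         # 한 자릿수씩 내려감
--         storey //= 10
--
--     return answer
-- ===== SOURCE B (Python) =====
-- def solution(storey):
--     if storey <= 0:
--         return 0
--     if storey < 10:
--         return min(storey, 11 - storey)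
--     d = storey % 10
--     q = storey // 10
--     return min(d + solution(q), (10 - d) + solution(q + 1))
-- ===== Notes on version B (the rewrite author's own statement) =====
-- stated objective: alternative
-- what changed: Replaced A's imperative greedy loop (mutating storey with an explicit 5-and-higher-digit tie-break) by a recursion on the number: per digit take the min of paying the digit down vs rounding up with a carry into the truncated higher part.
import Mathlib
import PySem

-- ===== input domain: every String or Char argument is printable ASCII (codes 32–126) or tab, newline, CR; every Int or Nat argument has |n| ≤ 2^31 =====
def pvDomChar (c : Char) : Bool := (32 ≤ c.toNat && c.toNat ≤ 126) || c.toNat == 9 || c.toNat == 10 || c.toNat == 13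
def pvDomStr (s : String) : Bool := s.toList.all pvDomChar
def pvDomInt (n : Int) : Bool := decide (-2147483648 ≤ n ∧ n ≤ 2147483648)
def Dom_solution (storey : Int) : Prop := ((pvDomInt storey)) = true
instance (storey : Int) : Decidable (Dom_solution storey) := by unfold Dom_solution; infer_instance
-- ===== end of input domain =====

-- B replaces A's greedy digit loop by a min-recursion over "pay digit down" vs "round up with carry"; alternative decomposition, same cost class.

-- ===== PORT A =====
-- termination lemmas for the ports (cited by name in decreasing_by to keep the definitions small)
theorem pv_dec_skip (s : Int) (h : 0 < s) : (PySem.Int.floordiv s 10).toNat < s.toNat := by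
  rw [PySem.Int.floordiv_eq_ediv_of_pos (by norm_num : (0:Int) < 10)]; omega

theorem pv_dec_up5 (s : Int) (h : 0 < s) (h5 : 5 < PySem.Int.mod s 10) :
    (PySem.Int.floordiv (s + (10 - PySem.Int.mod s 10)) 10).toNat < s.toNat := by
  rw [PySem.Int.floordiv_eq_ediv_of_pos (by norm_num : (0:Int) < 10)] at *
  rw [PySem.Int.mod_eq_emod_of_pos (by norm_num : (0:Int) < 10)] at *
  omega

theorem pv_dec_tie (s : Int) (h : 0 < s)
    (ht : PySem.Int.mod s 10 = 5 ∧ 5 ≤ PySem.Int.mod (PySem.Int.floordiv s 10) 10) :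
    (PySem.Int.floordiv (s + (10 - PySem.Int.mod s 10)) 10).toNat < s.toNat := by
  obtain ⟨h1, -⟩ := ht
  rw [PySem.Int.floordiv_eq_ediv_of_pos (by norm_num : (0:Int) < 10)] at *
  rw [PySem.Int.mod_eq_emod_of_pos (by norm_num : (0:Int) < 10)] at *
  omega

theorem pv_dec_down (s : Int) (h : 0 < s) :
    (PySem.Int.floordiv (s - PySem.Int.mod s 10) 10).toNat < s.toNat := by
  rw [PySem.Int.floordiv_eq_ediv_of_pos (by norm_num : (0:Int) < 10)]
  rw [PySem.Int.mod_eq_emod_of_pos (by norm_num : (0:Int) < 10)]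
  omega

theorem pv_dec_q (s : Int) (h : ¬ s < 10) : (PySem.Int.floordiv s 10).toNat < s.toNat := by
  rw [PySem.Int.floordiv_eq_ediv_of_pos (by norm_num : (0:Int) < 10)]; omega

theorem pv_dec_q1 (s : Int) (h : ¬ s < 10) : (PySem.Int.floordiv s 10 + 1).toNat < s.toNat := by
  rw [PySem.Int.floordiv_eq_ediv_of_pos (by norm_num : (0:Int) < 10)]; omega

def solution_loop (storey answer : Int) : Int :=
  if h : 0 < storey then
    if PySem.Int.mod storey 10 = 0 then
      solution_loop (PySem.Int.floordiv storey 10) answer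
    else if 5 < PySem.Int.mod storey 10 then
      solution_loop (PySem.Int.floordiv (storey + (10 - PySem.Int.mod storey 10)) 10)
        (answer + (10 - PySem.Int.mod storey 10))
    else if PySem.Int.mod storey 10 = 5 ∧ 5 ≤ PySem.Int.mod (PySem.Int.floordiv storey 10) 10 then
      solution_loop (PySem.Int.floordiv (storey + (10 - PySem.Int.mod storey 10)) 10)
        (answer + (10 - PySem.Int.mod storey 10))
    else
      solution_loop (PySem.Int.floordiv (storey - PySem.Int.mod storey 10) 10)
        (answer + PySem.Int.mod storey 10)
  else answer
termination_by storey.toNat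
decreasing_by
  · exact pv_dec_skip storey h
  · exact pv_dec_up5 storey h ‹5 < PySem.Int.mod storey 10›
  · exact pv_dec_tie storey h ‹PySem.Int.mod storey 10 = 5 ∧ 5 ≤ PySem.Int.mod (PySem.Int.floordiv storey 10) 10›
  · exact pv_dec_down storey h

def solution (storey : Int) : Int := solution_loop storey 0

-- ===== PORT B =====
def solution_alt (storey : Int) : Int :=
  if storey ≤ 0 then 0
  else if storey < 10 then min storey (11 - storey)
  else
    min (PySem.Int.mod storey 10 + solution_alt (PySem.Int.floordiv storey 10))
        ((10 - PySem.Int.mod storey 10) + solution_alt (PySem.Int.floordiv storey 10 + 1))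
termination_by storey.toNat
decreasing_by
  · exact pv_dec_q storey ‹¬ storey < 10›
  · exact pv_dec_q1 storey ‹¬ storey < 10›

-- ===== PRECONDITION & SPEC =====
def Spec_solution (storey : Int) (out : Int) : Prop := out = solution_alt storey
instance (storey : Int) (out : Int) : Decidable (Spec_solution storey out) := by unfold Spec_solution; infer_instance

-- ===== CLAIM (what is proved, stated in full; the proofs are below) =====
def Claim_equal_solution : Prop := ∀ (storey : Int), Dom_solution storey → Spec_solution storey (solution storey)

-- ===== LEMMAS AND PROOFS =====

theorem fd10 (a : Int) : PySem.Int.floordiv a 10 = a / 10 :=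
  PySem.Int.floordiv_eq_ediv_of_pos (by norm_num)

theorem md10 (a : Int) : PySem.Int.mod a 10 = a % 10 :=
  PySem.Int.mod_eq_emod_of_pos (by norm_num)

theorem alt_nonpos (s : Int) (h : s ≤ 0) : solution_alt s = 0 := by
  rw [solution_alt.eq_def]; simp [h]

theorem alt_small (s : Int) (h0 : 0 ≤ s) (h9 : s ≤ 9) : solution_alt s = min s (11 - s) := by
  rcases eq_or_lt_of_le h0 with h | h
  · rw [alt_nonpos s (by omega)]; omega
  · rw [solution_alt.eq_def]
    simp only [fd10, md10]
    rw [if_neg (by omega), if_pos (by omega)]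

theorem alt_big (s : Int) (h : 10 ≤ s) :
    solution_alt s =
      min (s % 10 + solution_alt (s / 10)) ((10 - s % 10) + solution_alt (s / 10 + 1)) := by
  rw [solution_alt.eq_def]
  simp only [fd10, md10]
  rw [if_neg (by omega), if_neg (by omega)]

-- Key structural lemma about B: the digit recursion is 1-Lipschitz, and the
-- direction of the step from q to q+1 is decided by q's last digit.
theorem alt_step : ∀ n : Nat, ∀ q : Int, q.toNat = n → 0 ≤ q →
    solution_alt q ≤ solution_alt (q + 1) + 1 ∧
    solution_alt (q + 1) ≤ solution_alt q + 1 ∧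
    (q % 10 ≤ 4 → solution_alt q ≤ solution_alt (q + 1)) ∧
    (5 ≤ q % 10 → solution_alt (q + 1) ≤ solution_alt q) := by
  intro n
  induction n using Nat.strong_induction_on with
  | _ n ih =>
    intro q hqn hq
    by_cases hsmall : q ≤ 8
    · rw [alt_small q (by omega) (by omega), alt_small (q + 1) (by omega) (by omega)]
      omega
    by_cases h9 : q = 9
    · subst h9
      rw [alt_small 9 (by norm_num) (by norm_num)]
      norm_num
      rw [alt_big 10 (by norm_num)]
      norm_num
      rw [alt_small 1 (by norm_num) (by norm_num), alt_small 2 (by norm_num) (by norm_num)]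
      omega
    have hq10 : 10 ≤ q := by omega
    have hq' : (0:Int) ≤ q / 10 := by omega
    have hIHq := ih (q / 10).toNat (by omega) (q / 10) rfl hq'
    rw [alt_big q (by omega), alt_big (q + 1) (by omega)]
    by_cases he : q % 10 ≤ 8
    · have e1 : (q + 1) / 10 = q / 10 := by omega
      have e2 : (q + 1) % 10 = q % 10 + 1 := by omega
      rw [e1, e2]
      revert hIHq
      generalize solution_alt (q / 10) = x
      generalize solution_alt (q / 10 + 1) = y
      omega
    · -- last digit 9: the step carries into q/10 + 1
      have hIHq1 := ih (q / 10 + 1).toNat (by omega) (q / 10 + 1) rfl (by omega)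
      have e1 : (q + 1) / 10 = q / 10 + 1 := by omega
      have e2 : (q + 1) % 10 = 0 := by omega
      have e3 : q / 10 + 1 + 1 = q / 10 + 2 := by ring
      rw [e1, e2]
      rw [e3] at hIHq1 ⊢
      revert hIHq hIHq1
      generalize solution_alt (q / 10) = x
      generalize solution_alt (q / 10 + 1) = y
      generalize solution_alt (q / 10 + 2) = z
      omega

-- The loop of A accumulates exactly B's value.
theorem loop_eq : ∀ n : Nat, ∀ s a : Int, s.toNat = n →
    solution_loop s a = a + solution_alt s := by
  intro n
  induction n using Nat.strong_induction_on with
  | _ n ih =>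
    intro s a hsn
    rw [solution_loop.eq_def]
    simp only [fd10, md10]
    by_cases hs : 0 < s
    · rw [dif_pos hs]
      have hq' : (0:Int) ≤ s / 10 := by omega
      have hL := alt_step (s / 10).toNat (s / 10) rfl hq'
      by_cases h0 : s % 10 = 0
      · -- digit 0: skip
        rw [if_pos h0, ih (s / 10).toNat (by omega) (s / 10) a rfl]
        have h10 : 10 ≤ s := by omega
        rw [alt_big s h10, h0]
        revert hL
        generalize solution_alt (s / 10) = x
        generalize solution_alt (s / 10 + 1) = y
        omega
      rw [if_neg h0]
      by_cases h5 : 5 < s % 10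
      · -- digit > 5: round up
        have harg : (s + (10 - s % 10)) / 10 = s / 10 + 1 := by omega
        rw [if_pos h5, harg, ih (s / 10 + 1).toNat (by omega) (s / 10 + 1) _ rfl]
        by_cases h10 : 10 ≤ s
        · rw [alt_big s h10]
          revert hL
          generalize solution_alt (s / 10) = x
          generalize solution_alt (s / 10 + 1) = y
          omega
        · have hsd : s / 10 = 0 := by omega
          rw [alt_small s (by omega) (by omega), hsd]
          norm_num
          rw [alt_small 1 (by norm_num) (by norm_num)]
          omega
      rw [if_neg h5]
      by_cases htie : s % 10 = 5 ∧ 5 ≤ s / 10 % 10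
      · -- digit 5 with high neighbour ≥ 5: round up
        have h10 : 10 ≤ s := by omega
        have harg : (s + (10 - s % 10)) / 10 = s / 10 + 1 := by omega
        rw [if_pos htie, harg, ih (s / 10 + 1).toNat (by omega) (s / 10 + 1) _ rfl]
        rw [alt_big s h10]
        obtain ⟨ht1, ht2⟩ := htie
        revert hL
        generalize solution_alt (s / 10) = x
        generalize solution_alt (s / 10 + 1) = y
        omega
      · -- pay the digit down
        have harg : (s - s % 10) / 10 = s / 10 := by omega
        rw [if_neg htie, harg, ih (s / 10).toNat (by omega) (s / 10) _ rfl]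
        by_cases h10 : 10 ≤ s
        · rw [alt_big s h10]
          revert hL htie
          generalize solution_alt (s / 10) = x
          generalize solution_alt (s / 10 + 1) = y
          omega
        · have hsd : s / 10 = 0 := by omega
          rw [alt_small s (by omega) (by omega), hsd, alt_nonpos 0 le_rfl]
          omega
    · rw [dif_neg hs, alt_nonpos s (by omega)]
      omega

-- ===== VERDICT (by name: the statement is the Claim_ definition above) =====
theorem solution_spec : Claim_equal_solution := by
  intro storey _
  unfold Spec_solution solution
  rw [loop_eq storey.toNat storey 0 rfl]
  omega
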